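-- pv_equiv track=rewrite | github.com/mittleff/libcerf | devtool/pro_imwofx_chebcoeffs.py | polynomial_coefs
-- ===== SOURCE A (Python) =====
-- def polynomial_coefs(C):
--     """
--     Converts Chebyshev to power-series coefficients for faster computation in the final C code.
--     Returns list P such that approximant is just sum_i P_i x^i.
--     """
--     N = len(C) - 1
--     # Compute coefficients T_ni such that T_n(x) = sum_i T_ni x^i.
--     # We also save zeros; this could be done better.
--     T = [[1], [0, 1]]
--     for n in range(2, N+1):
--         t = [ -T[n-2][0] ]
--         for i in range(1, n+1):
--             if (i-n)%2==1:
--                 t.append(0)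
--             elif n>i:
--                 t.append(2*T[n-1][i-1]-T[n-2][i] )
--             else:
--                 t.append(2*T[n-1][i-1] )
--         T.append(t)
--
--     # Compute coefficients of x^i, such that P_i = sum_n C_n T_ni.
--     P = []
--     for i in range(N+1):
--         sum = 0
--         for n in range(i, N+1):
--             sum += C[n] * T[n][i]
--         P.append(sum)
--
--     return P
-- ===== SOURCE B (Python) =====
-- def polynomial_coefs(C):
--     """
--     Converts Chebyshev to power-series coefficients.
--     Single fused pass keeping only the last two Chebyshev rows (O(N) memory
--     instead of the full O(N^2) matrix), accumulating P as it goes.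
--     """
--     N = len(C) - 1
--     if N < 0:
--         return []
--     P = [C[0]] + [0] * N
--     if N >= 1:
--         P[1] = C[1]
--     prev2, prev1 = [1], [0, 1]
--     for n in range(2, N + 1):
--         t = [-prev2[0]]
--         for i in range(1, n + 1):
--             if (i - n) % 2 == 1:
--                 t.append(0)
--             elif i < n:
--                 t.append(2 * prev1[i - 1] - prev2[i])
--             else:
--                 t.append(2 * prev1[i - 1])
--         P = [p + C[n] * v for p, v in zip(P, t + [0] * (N - n))]
--         prev2, prev1 = prev1, t
--     return P
-- ===== Notes on version B (the rewrite author's own statement) =====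
-- stated objective: alternative
-- what changed: B fuses A's two passes into one sweep over n that keeps only the last two Chebyshev coefficient rows (prev2, prev1) and accumulates the power-series coefficient vector P on the fly, instead of storing the whole row matrix T and then combining it with a second nested loop; memory drops from O(N^2) to O(N).
import Mathlib
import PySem

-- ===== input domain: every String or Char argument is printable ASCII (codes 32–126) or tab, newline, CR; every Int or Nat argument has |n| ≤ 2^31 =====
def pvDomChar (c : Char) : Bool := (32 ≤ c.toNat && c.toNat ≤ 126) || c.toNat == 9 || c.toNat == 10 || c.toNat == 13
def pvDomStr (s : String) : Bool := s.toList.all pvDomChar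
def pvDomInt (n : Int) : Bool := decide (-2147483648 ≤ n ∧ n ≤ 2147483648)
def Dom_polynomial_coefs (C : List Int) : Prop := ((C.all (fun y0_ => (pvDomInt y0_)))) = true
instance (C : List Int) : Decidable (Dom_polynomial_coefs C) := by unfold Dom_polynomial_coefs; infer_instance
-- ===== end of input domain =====

-- B fuses A's two passes into one, keeping only the last two Chebyshev rows (O(N) memory
-- instead of the full matrix) and accumulating the power-series coefficients as it goes.


-- ===== PORT A =====
-- Literal transliteration of A.  All Python indexings (T[n-1][i-1], C[n], …) are in range on
-- every input (A is total), so they are ported with the total pyGetD form.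
def polynomial_coefs (C : List Int) : List Int :=
  let N : Int := (C.length : Int) - 1
  let T : List (List Int) :=
    (PySem.List.pyRange 2 (N + 1) 1).foldl (fun T n =>
      let t : List Int :=
        (PySem.List.pyRange 1 (n + 1) 1).foldl (fun t i =>
          if PySem.Int.mod (i - n) 2 = 1 then
            t ++ [0]
          else if n > i then
            t ++ [2 * PySem.List.pyGetD (PySem.List.pyGetD T (n - 1) []) (i - 1) 0
                    - PySem.List.pyGetD (PySem.List.pyGetD T (n - 2) []) i 0]
          else
            t ++ [2 * PySem.List.pyGetD (PySem.List.pyGetD T (n - 1) []) (i - 1) 0])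
          [-(PySem.List.pyGetD (PySem.List.pyGetD T (n - 2) []) 0 0)]
      T ++ [t])
      [[1], [0, 1]]
  (PySem.List.pyRange 0 (N + 1) 1).foldl (fun P i =>
    P ++ [(PySem.List.pyRange i (N + 1) 1).foldl (fun sum n =>
      sum + PySem.List.pyGetD C n 0 * PySem.List.pyGetD (PySem.List.pyGetD T n []) i 0) 0]) []

-- ===== PORT B =====
-- Source B's inner loop: build the next Chebyshev row from the previous two.
def nextRow (p2 p1 : List Int) (n : Int) : List Int :=
  (PySem.List.pyRange 1 (n + 1) 1).foldl (fun t i =>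
    if PySem.Int.mod (i - n) 2 = 1 then
      t ++ [0]
    else if i < n then
      t ++ [2 * PySem.List.pyGetD p1 (i - 1) 0 - PySem.List.pyGetD p2 i 0]
    else
      t ++ [2 * PySem.List.pyGetD p1 (i - 1) 0])
    [-(PySem.List.pyGetD p2 0 0)]

def polynomial_coefs_alt (C : List Int) : List Int :=
  let N : Int := (C.length : Int) - 1
  if N < 0 then []
  else
    let P0 : List Int := PySem.List.pyGetD C 0 0 :: List.replicate N.toNat 0
    let P1 : List Int :=
      if 1 ≤ N then PySem.List.pySetD P0 1 (PySem.List.pyGetD C 1 0) else P0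
    let st := (PySem.List.pyRange 2 (N + 1) 1).foldl
      (fun (st : List Int × List Int × List Int) n =>
        let t := nextRow st.2.1 st.2.2 n
        (List.zipWith (fun p v => p + PySem.List.pyGetD C n 0 * v) st.1
            (t ++ List.replicate (N - n).toNat 0),
         st.2.2, t))
      (P1, ([1], [0, 1]))
    st.1

-- ===== PRECONDITION & SPEC =====
def Spec_polynomial_coefs (C : List Int) (out : List Int) : Prop := out = polynomial_coefs_alt C
instance (C : List Int) (out : List Int) : Decidable (Spec_polynomial_coefs C out) := by unfold Spec_polynomial_coefs; infer_instance

-- ===== CLAIM (what is proved, stated in full; the proofs are below) =====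
def Claim_equal_polynomial_coefs : Prop := ∀ (C : List Int), Dom_polynomial_coefs C → Spec_polynomial_coefs C (polynomial_coefs C)

-- ===== LEMMAS AND PROOFS =====

-- the value appended for column i while building row n from rows p1 (previous) and p2 (before that)
def chebVal (p2 p1 : List Int) (n i : Int) : Int :=
  if PySem.Int.mod (i - n) 2 = 1 then 0
  else if i < n then 2 * PySem.List.pyGetD p1 (i - 1) 0 - PySem.List.pyGetD p2 i 0
  else 2 * PySem.List.pyGetD p1 (i - 1) 0

theorem nextRow_eq (p2 p1 : List Int) (n : Int) :
    nextRow p2 p1 n =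
      -(PySem.List.pyGetD p2 0 0) :: (PySem.List.pyRange 1 (n + 1) 1).map (chebVal p2 p1 n) := by
  unfold nextRow
  have hf : (fun (t : List Int) (i : Int) =>
      if PySem.Int.mod (i - n) 2 = 1 then t ++ [0]
      else if i < n then t ++ [2 * PySem.List.pyGetD p1 (i - 1) 0 - PySem.List.pyGetD p2 i 0]
      else t ++ [2 * PySem.List.pyGetD p1 (i - 1) 0]) =
      (fun t i => t ++ [chebVal p2 p1 n i]) := by
    funext t i; unfold chebVal; split_ifs <;> rfl
  rw [hf, PySem.List.foldl_append_singleton_eq_map]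
  rfl

-- the coefficient rows of the Chebyshev polynomials T_n
def row : Nat → List Int
  | 0 => [1]
  | 1 => [0, 1]
  | (n + 2) => nextRow (row n) (row (n + 1)) ((n : Int) + 2)

def coef (n i : Nat) : Int := (row n).getD i 0

def Ssum (C : List Int) (u i : Nat) : Int :=
  ((List.range u).map (fun n => C.getD n 0 * coef n i)).sum

theorem length_row (n : Nat) : (row n).length = n + 1 := by
  match n with
  | 0 => rfl
  | 1 => rfl
  | (k + 2) =>
      rw [show row (k + 2) = nextRow (row k) (row (k + 1)) ((k : Int) + 2) from rfl, nextRow_eq]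
      simp [PySem.List.length_pyRange_one]
      omega

theorem coef_zero_of_lt {n i : Nat} (h : n < i) : coef n i = 0 := by
  unfold coef
  rw [List.getD_eq_default]
  rw [length_row]
  omega

theorem row_succ (m : Nat) (h : 2 ≤ m) :
    nextRow (row (m - 2)) (row (m - 1)) (m : Int) = row m := by
  obtain ⟨k, rfl⟩ : ∃ k, m = k + 2 := ⟨m - 2, by omega⟩
  rw [show row (k + 2) = nextRow (row k) (row (k + 1)) ((k : Int) + 2) from rfl]
  norm_num

-- named forms of the two ports' loops
def buildT (b : Int) : List (List Int) :=
  (PySem.List.pyRange 2 b 1).foldl (fun T n =>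
    T ++ [nextRow (PySem.List.pyGetD T (n - 2) []) (PySem.List.pyGetD T (n - 1) []) n])
    [[1], [0, 1]]

def innerSum (C : List Int) (T : List (List Int)) (b i : Int) : Int :=
  (PySem.List.pyRange i b 1).foldl (fun sum n =>
    sum + PySem.List.pyGetD C n 0 * PySem.List.pyGetD (PySem.List.pyGetD T n []) i 0) 0

def outerA (C : List Int) (T : List (List Int)) (b : Int) : List Int :=
  (PySem.List.pyRange 0 b 1).foldl (fun P i => P ++ [innerSum C T b i]) []

theorem A_unfold (C : List Int) :
    polynomial_coefs C =
      outerA C (buildT ((C.length : Int) - 1 + 1)) ((C.length : Int) - 1 + 1) := rfl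

def stepB (C : List Int) (N : Int) (st : List Int × List Int × List Int) (n : Int) :
    List Int × List Int × List Int :=
  let t := nextRow st.2.1 st.2.2 n
  (List.zipWith (fun p v => p + PySem.List.pyGetD C n 0 * v) st.1
      (t ++ List.replicate (N - n).toNat 0),
   st.2.2, t)

def runB (C : List Int) (N : Int) : List Int :=
  let P0 : List Int := PySem.List.pyGetD C 0 0 :: List.replicate N.toNat 0
  let P1 : List Int := if 1 ≤ N then PySem.List.pySetD P0 1 (PySem.List.pyGetD C 1 0) else P0
  ((PySem.List.pyRange 2 (N + 1) 1).foldl (stepB C N) (P1, ([1], [0, 1]))).1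

theorem B_unfold (C : List Int) :
    polynomial_coefs_alt C =
      if ((C.length : Int) - 1) < 0 then [] else runB C ((C.length : Int) - 1) := rfl

-- A's outer loop builds exactly the first m rows
theorem TA_eq (m : Nat) (h : 2 ≤ m) :
    buildT (m : Int) = (List.range m).map row := by
  induction m, h using Nat.le_induction with
  | base => rfl
  | succ m hm ih =>
      have hc : ((m + 1 : Nat) : Int) = (m : Int) + 1 := by push_cast; ring
      unfold buildT at ih ⊢
      rw [hc, PySem.List.pyRange_one_succ_right (by exact_mod_cast hm),
        List.foldl_append, ih]
      simp only [List.foldl_cons, List.foldl_nil]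
      obtain ⟨k, rfl⟩ : ∃ k, m = k + 2 := ⟨m - 2, by omega⟩
      have h1 : ((k + 2 : Nat) : Int) - 1 = ((k + 1 : Nat) : Int) := by push_cast; ring
      have h2 : ((k + 2 : Nat) : Int) - 2 = ((k : Nat) : Int) := by push_cast; ring
      rw [h1, h2, PySem.List.pyGetD_natCast, PySem.List.pyGetD_natCast,
        PySem.List.getD_map_range _ _ _ _ (by omega), PySem.List.getD_map_range _ _ _ _ (by omega)]
      conv_rhs => rw [List.range_succ, List.map_append]
      congr 1

theorem sum_shift (g : Nat → Int) (i u : Nat) (h : i ≤ u) (hz : ∀ n < i, g n = 0) :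
    ((List.range (u - i)).map (fun k => g (i + k))).sum = ((List.range u).map g).sum := by
  induction i with
  | zero => simp
  | succ j ih =>
      rw [← ih (by omega) (fun n hn => hz n (by omega))]
      rw [show u - j = (u - (j + 1)) + 1 from by omega, List.range_succ_eq_map]
      simp only [List.map_cons, List.map_map, List.sum_cons, Nat.add_zero]
      rw [hz j (by omega), zero_add]
      congr 1
      apply List.map_congr_left
      intro k _
      simp only [Function.comp_apply, Nat.succ_eq_add_one]
      congr 1
      omega

theorem buildT_eq (K : Nat) :
    buildT (((K + 1 : Nat) : Int)) = (List.range (max 2 (K + 1))).map row := by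
  rcases Nat.lt_or_ge K 1 with h | h
  · interval_cases K
    rfl
  · rw [show max 2 (K + 1) = K + 1 from by omega]
    exact TA_eq (K + 1) (by omega)

theorem innerSum_eq (C : List Int) (K : Nat) (i : Nat) (hi : i < K + 1) :
    innerSum C ((List.range (max 2 (K + 1))).map row) ((K + 1 : Nat) : Int) (i : Nat) =
      Ssum C (K + 1) i := by
  unfold innerSum
  rw [PySem.List.foldl_add, zero_add, PySem.List.pyRange_one, List.map_map]
  have ht : (((K + 1 : Nat) : Int) - (i : Nat)).toNat = K + 1 - i := by omega
  rw [ht]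
  have hstep : ∀ k < K + 1 - i,
      ((fun n => PySem.List.pyGetD C n 0 *
          PySem.List.pyGetD (PySem.List.pyGetD ((List.range (max 2 (K + 1))).map row) n [])
            (i : Nat) 0) ∘ fun k => (i : Int) + (k : Nat)) k =
        C.getD (i + k) 0 * coef (i + k) i := by
    intro k hk
    simp only [Function.comp_apply]
    rw [show ((i : Int) + (k : Nat)) = ((i + k : Nat) : Int) from by push_cast; ring]
    simp only [PySem.List.pyGetD_natCast]
    rw [PySem.List.getD_map_range _ _ _ _ (by omega)]
    rfl
  rw [List.map_congr_left (fun k hk => hstep k (by simpa using List.mem_range.mp hk))]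
  unfold Ssum
  exact sum_shift (fun n => C.getD n 0 * coef n i) i (K + 1) (by omega)
    (fun n hn => by show C.getD n 0 * coef n i = 0; rw [coef_zero_of_lt hn, mul_zero])

-- A computes, entry by entry, the full sum over all rows
theorem polyA_eq (c : Int) (cs : List Int) :
    polynomial_coefs (c :: cs) =
      (List.range (cs.length + 1)).map (fun i => Ssum (c :: cs) (cs.length + 1) i) := by
  rw [A_unfold]
  have e1 : (((c :: cs).length : Int) - 1 + 1) = ((cs.length + 1 : Nat) : Int) := by
    simp
  rw [e1, buildT_eq]
  unfold outerA
  rw [PySem.List.foldl_append_singleton_eq_map, List.nil_append, PySem.List.pyRange_zero_nat,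
    List.map_map]
  apply List.map_congr_left
  intro i hi
  exact innerSum_eq (c :: cs) cs.length i (List.mem_range.mp hi)

theorem pad_row (n K : Nat) (h : n ≤ K) :
    row n ++ List.replicate (K - n) 0 = (List.range (K + 1)).map (fun i => coef n i) := by
  apply List.ext_getElem
  · simp [length_row]; omega
  · intro i h1 h2
    rw [List.getElem_map, List.getElem_range, List.getElem_append]
    split
    · next h3 =>
        unfold coef
        rw [List.getD_eq_getElem?_getD, List.getElem?_eq_getElem h3, Option.getD_some]
    · next h3 =>
        rw [List.getElem_replicate]
        rw [length_row] at h3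
        exact (coef_zero_of_lt (by omega)).symm

theorem Ssum_two (C : List Int) (i : Nat) :
    Ssum C 2 i = C.getD 0 0 * coef 0 i + C.getD 1 0 * coef 1 i := by
  show ([(0 : Nat), 1].map (fun n => C.getD n 0 * coef n i)).sum = _
  simp

theorem Ssum_succ (C : List Int) (u i : Nat) :
    Ssum C (u + 1) i = Ssum C u i + C.getD u 0 * coef u i := by
  unfold Ssum
  rw [List.range_succ, List.map_append, List.sum_append]
  simp

theorem coef_zero_col (i : Nat) : coef 0 (i + 1) = 0 := coef_zero_of_lt (by omega)
theorem coef_one_col (i : Nat) : coef 1 (i + 2) = 0 := coef_zero_of_lt (by omega)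

theorem P1_eq (c : Int) (cs : List Int) :
    (if 1 ≤ ((cs.length : Nat) : Int) then
        PySem.List.pySetD (c :: List.replicate cs.length 0) 1 (cs.getD 0 0)
      else c :: List.replicate cs.length 0) =
      (List.range (cs.length + 1)).map (fun i => Ssum (c :: cs) 2 i) := by
  cases cs with
  | nil =>
      rw [if_neg (by norm_num)]
      show [c] = [Ssum [c] 2 0]
      rw [Ssum_two]
      simp [coef, row]
  | cons c1 cs' =>
      rw [if_pos (by simp only [List.length_cons]; omega), List.getD_cons_zero]
      have hset : PySem.List.pySetD (c :: List.replicate (c1 :: cs').length 0) 1 c1 =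
          c :: c1 :: List.replicate cs'.length 0 := by
        simp only [List.length_cons, List.replicate_succ]
        rw [← Nat.cast_one (R := Int), PySem.List.pySetD_natCast]
        rfl
      rw [hset]
      apply List.ext_getElem
      · simp
      · intro i h1 h2
        rw [List.getElem_map, List.getElem_range, Ssum_two]
        match i with
        | 0 => simp [coef, row]
        | 1 => simp [coef, row]
        | (j + 2) =>
            rw [coef_zero_col (j + 1), coef_one_col j]
            simp

-- B's loop invariant
theorem B_loop (c : Int) (cs : List Int) (m : Nat) (h2 : 2 ≤ m) (hm : m ≤ cs.length + 1) :
    (PySem.List.pyRange 2 (m : Int) 1).foldl (stepB (c :: cs) ((cs.length : Nat) : Int))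
      ((List.range (cs.length + 1)).map (fun i => Ssum (c :: cs) 2 i), ([1], [0, 1])) =
      ((List.range (cs.length + 1)).map (fun i => Ssum (c :: cs) m i),
        (row (m - 2), row (m - 1))) := by
  induction m, h2 using Nat.le_induction with
  | base =>
      rw [PySem.List.pyRange_one_eq_nil (by norm_num), List.foldl_nil]
      rfl
  | succ m hm2 ih =>
      have hmK : m ≤ cs.length := by omega
      have hc : ((m + 1 : Nat) : Int) = (m : Int) + 1 := by push_cast; ring
      rw [hc, PySem.List.pyRange_one_succ_right (by exact_mod_cast hm2.trans (by omega)),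
        List.foldl_append, ih (by omega)]
      simp only [List.foldl_cons, List.foldl_nil]
      unfold stepB
      simp only []
      rw [row_succ m (by omega)]
      have hrep : (((cs.length : Nat) : Int) - (m : Int)).toNat = cs.length - m := by omega
      rw [hrep, pad_row m cs.length hmK, List.zipWith_map, List.zipWith_self]
      rw [PySem.List.pyGetD_natCast]
      rw [show m + 1 - 2 = m - 1 from by omega, Nat.add_sub_cancel]
      simp only [Prod.mk.injEq]
      exact ⟨List.map_congr_left (fun i _ => (Ssum_succ (c :: cs) m i).symm), trivial⟩

theorem pyGetD_one_cons (a : Int) (xs : List Int) (d : Int) :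
    PySem.List.pyGetD (a :: xs) 1 d = xs.getD 0 d := by
  rw [← Nat.cast_one (R := Int), PySem.List.pyGetD_natCast]
  rfl

theorem polyB_eq (c : Int) (cs : List Int) :
    polynomial_coefs_alt (c :: cs) =
      (List.range (cs.length + 1)).map
        (fun i => Ssum (c :: cs) (max 2 (cs.length + 1)) i) := by
  rw [B_unfold]
  have e1 : (((c :: cs).length : Int) - 1) = ((cs.length : Nat) : Int) := by simp
  rw [e1, if_neg (by omega)]
  unfold runB
  simp only [Int.toNat_natCast, PySem.List.pyGetD_zero_cons, pyGetD_one_cons]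
  rw [P1_eq]
  cases cs with
  | nil =>
      rw [show ((([] : List Int).length : Int) + 1) = 1 from by simp,
        PySem.List.pyRange_one_eq_nil (by omega), List.foldl_nil]
      rfl
  | cons c1 cs' =>
      rw [show ((((c1 :: cs').length : Nat) : Int) + 1) = (((c1 :: cs').length + 1 : Nat) : Int)
          from by push_cast; ring]
      rw [B_loop c (c1 :: cs') ((c1 :: cs').length + 1)
        (by simp only [List.length_cons]; omega) (by omega)]
      rw [show max 2 ((c1 :: cs').length + 1) = (c1 :: cs').length + 1
          from by simp only [List.length_cons]; omega]

theorem Ssum_top (c : Int) (cs : List Int) (i : Nat) :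
    Ssum (c :: cs) (max 2 (cs.length + 1)) i = Ssum (c :: cs) (cs.length + 1) i := by
  cases cs with
  | nil =>
      show Ssum [c] 2 i = Ssum [c] 1 i
      rw [Ssum_two]
      show _ = ([(0 : Nat)].map (fun n => List.getD [c] n 0 * coef n i)).sum
      simp
  | cons c1 cs' =>
      rw [show max 2 ((c1 :: cs').length + 1) = (c1 :: cs').length + 1
          from by simp only [List.length_cons]; omega]

-- ===== VERDICT (by name: the statement is the Claim_ definition above) =====
theorem polynomial_coefs_spec : Claim_equal_polynomial_coefs := by
  intro C _
  unfold Spec_polynomial_coefs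
  cases C with
  | nil => rfl
  | cons c cs =>
      rw [polyA_eq, polyB_eq]
      exact (List.map_congr_left (fun i _ => (Ssum_top c cs i).symm))
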